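-- pv_equiv track=rewrite | github.com/1092soobin2/Algorithm-Study | 수학/(0) 구현__프그_lv3_숫자게임.py | solution
-- ===== SOURCE A (Python) =====
-- def solution(A, B):
--     answer = 0
--
--     # 숫자가 큰 쪽이 승리 -> 승점 1점
--     # 숫자가 같다면 무승부
--     A.sort()
--     B.sort()
--     a_i, b_i = 0, 0
--     num = len(A)
--
--     while a_i < num and b_i < num:
--         if B[b_i] > A[a_i]:
--             a_i += 1
--             answer += 1
--         b_i += 1
--
--
--     return answer
-- ===== SOURCE B (Python) =====
-- def solution(A, B):
--     # Rank-based counting: sort both, then for each of the first len(A)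
--     # elements b of B, binary-search the number of A-elements strictly
--     # below b; b wins a match iff some still-unmatched A-element is below it,
--     # i.e. iff matched < rank(b).  No element-to-element pairing is kept.
--     A.sort()
--     B.sort()
--     n = len(A)
--     matched = 0
--     for j in range(n):
--         b = B[j]
--         lo, hi = 0, n
--         while lo < hi:
--             mid = (lo + hi) // 2
--             if A[mid] < b:
--                 lo = mid + 1
--             else:
--                 hi = mid
--         if matched < lo:
--             matched += 1
--     return matched
-- ===== Notes on version B (the rewrite author's own statement) =====
-- stated objective: alternative
-- what changed: Replaces the two-pointer greedy sweep by rank-based counting: for each of the first len(A) elements of sorted B, a hand-written binary search gives the number of A-elements strictly below it, and the element wins iff matched < that rank; no pairing pointer into A is kept.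
import Mathlib
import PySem

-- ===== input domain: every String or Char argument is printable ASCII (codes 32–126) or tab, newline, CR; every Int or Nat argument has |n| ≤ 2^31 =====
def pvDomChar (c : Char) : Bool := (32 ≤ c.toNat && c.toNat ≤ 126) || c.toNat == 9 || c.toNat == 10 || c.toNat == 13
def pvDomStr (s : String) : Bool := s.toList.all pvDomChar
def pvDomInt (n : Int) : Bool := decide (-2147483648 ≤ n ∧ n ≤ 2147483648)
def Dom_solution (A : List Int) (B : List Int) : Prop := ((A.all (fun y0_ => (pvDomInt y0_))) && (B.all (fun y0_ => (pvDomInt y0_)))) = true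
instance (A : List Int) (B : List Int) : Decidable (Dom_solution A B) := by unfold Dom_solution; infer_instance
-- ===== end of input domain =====

-- B replaces the two-pointer greedy sweep by rank counting (a binary search per element of B);
-- the equal return value is proved. Both Pythons sort A and B in place identically; the
-- equivalence proved here is about the return value.

-- ===== PORT A =====
-- A's while-loop: state (a_i, b_i, answer). Fuel only makes the loop total: b_i increments every
-- iteration, so fuel = num suffices and the guard itself stops the loop first. Under Pre_ every
-- index access is in range, so getD with default 0 is exact.
def pvLoopA (S T : List Int) (num : Nat) : Nat → Nat → Nat → Int → Int
  | 0, _, _, ans => ans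
  | fuel + 1, a_i, b_i, ans =>
    if a_i < num ∧ b_i < num then
      if T.getD b_i 0 > S.getD a_i 0 then
        pvLoopA S T num fuel (a_i + 1) (b_i + 1) (ans + 1)
      else
        pvLoopA S T num fuel a_i (b_i + 1) ans
    else ans

def solution (A : List Int) (B : List Int) : Int :=
  let S := PySem.List.sorted A (fun x => x) false
  let T := PySem.List.sorted B (fun x => x) false
  pvLoopA S T S.length S.length 0 0 0

-- ===== PORT B =====
-- Source B's hand-written binary-search while-loop, ported step for step; fuel = n makes it total
-- (hi - lo shrinks every iteration). mid = (lo+hi)//2 on nonnegative ints is Nat division;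
-- A[mid] is in range since mid < hi ≤ n.
def pvBis (S : List Int) (b : Int) : Nat → Nat → Nat → Nat
  | 0, lo, _ => lo
  | fuel + 1, lo, hi =>
    if lo < hi then
      let mid := (lo + hi) / 2
      if S.getD mid 0 < b then pvBis S b fuel (mid + 1) hi else pvBis S b fuel lo mid
    else lo

def solution_alt (A : List Int) (B : List Int) : Int :=
  let S := PySem.List.sorted A (fun x => x) false
  let T := PySem.List.sorted B (fun x => x) false
  let n := S.length
  (List.range n).foldl (fun (matched : Int) j =>
    if matched < (pvBis S (T.getD j 0) n 0 n : Int) then matched + 1 else matched) 0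

-- ===== PRECONDITION & SPEC =====
-- Pre_ excludes exactly the inputs where Python A raises IndexError: the while bound is len(A)
-- for both indices, so whenever len(B) < len(A) the access B[b_i] eventually goes out of range.
def Pre_solution (A : List Int) (B : List Int) : Prop := A.length ≤ B.length
instance (A : List Int) (B : List Int) : Decidable (Pre_solution A B) := by unfold Pre_solution; infer_instance
def pvWitness_solution : List Int × List Int := ([1, 5, 3], [2, 4, 6])

def Spec_solution (A : List Int) (B : List Int) (out : Int) : Prop := out = solution_alt A B
instance (A : List Int) (B : List Int) (out : Int) : Decidable (Spec_solution A B out) := by unfold Spec_solution; infer_instance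

-- ===== CLAIM (what is proved, stated in full; the proofs are below) =====
def Claim_equal_solution : Prop := ∀ (A : List Int) (B : List Int), Dom_solution A B → Pre_solution A B → Spec_solution A B (solution A B)

-- ===== LEMMAS AND PROOFS =====

-- monotone access into a nondecreasing list
theorem pvGetD_mono (S : List Int) (hs : List.Pairwise (· ≤ ·) S)
    {i j : Nat} (hij : i ≤ j) (hj : j < S.length) :
    S.getD i 0 ≤ S.getD j 0 := by
  rcases Nat.lt_or_ge i j with h | h
  · have hi : i < S.length := Nat.lt_of_lt_of_le h (Nat.le_of_lt hj)
    rw [List.getD_eq_getElem S 0 hi, List.getD_eq_getElem S 0 hj]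
    exact (List.pairwise_iff_getElem.mp hs) i j hi hj h
  · have : i = j := Nat.le_antisymm hij h
    rw [this]

-- the binary search returns the rank of b in the sorted list S
theorem pvBis_spec (S : List Int) (hs : List.Pairwise (· ≤ ·) S) (b : Int) :
    ∀ (fuel lo hi : Nat), hi - lo ≤ fuel → lo ≤ hi → hi ≤ S.length →
      (∀ i, i < lo → S.getD i 0 < b) → (hi < S.length → ¬ S.getD hi 0 < b) →
      (∀ i, i < pvBis S b fuel lo hi → S.getD i 0 < b) ∧
      (pvBis S b fuel lo hi < S.length → ¬ S.getD (pvBis S b fuel lo hi) 0 < b) ∧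
      pvBis S b fuel lo hi ≤ S.length := by
  intro fuel
  induction fuel with
  | zero =>
    intro lo hi hf hle hlen hlo hhi
    have heq : lo = hi := by omega
    exact ⟨hlo, heq ▸ hhi, heq ▸ hlen⟩
  | succ fuel ih =>
    intro lo hi hf hle hlen hlo hhi
    rw [pvBis]
    by_cases h : lo < hi
    · rw [if_pos h]
      by_cases hm : S.getD ((lo + hi) / 2) 0 < b
      · simp only [if_pos hm]
        refine ih ((lo + hi) / 2 + 1) hi (by omega) (by omega) hlen ?_ hhi
        intro i hi2
        rcases Nat.lt_or_ge i ((lo + hi) / 2) with h2 | h2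
        · exact Int.lt_of_le_of_lt
            (pvGetD_mono S hs (Nat.le_of_lt h2) (by omega)) hm
        · have : i = (lo + hi) / 2 := by omega
          rw [this]; exact hm
      · simp only [if_neg hm]
        exact ih lo ((lo + hi) / 2) (by omega) (by omega) (by omega) hlo (fun _ => hm)
    · rw [if_neg h]
      have heq : lo = hi := by omega
      exact ⟨hlo, heq ▸ hhi, heq ▸ hlen⟩

-- "matched < rank(b)" says exactly "matched is in range and S[matched] < b"
theorem pvBis_lt_iff (S : List Int) (hs : List.Pairwise (· ≤ ·) S) (b : Int) (a : Nat) :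
    a < pvBis S b S.length 0 S.length ↔ a < S.length ∧ S.getD a 0 < b := by
  obtain ⟨h1, h2, h3⟩ := pvBis_spec S hs b S.length 0 S.length (by omega) (by omega)
    (Nat.le_refl _) (by omega) (by omega)
  constructor
  · intro h
    exact ⟨Nat.lt_of_lt_of_le h h3, h1 a h⟩
  · rintro ⟨ha, hb⟩
    by_contra hcon
    have hr : pvBis S b S.length 0 S.length ≤ a := Nat.le_of_not_lt hcon
    have hrn : pvBis S b S.length 0 S.length < S.length := Nat.lt_of_le_of_lt hr ha
    exact (h2 hrn) (Int.lt_of_le_of_lt (pvGetD_mono S hs hr ha) hb)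

-- the search result never exceeds hi (no sortedness needed)
theorem pvBis_le (S : List Int) (b : Int) :
    ∀ (fuel lo hi : Nat), lo ≤ hi → pvBis S b fuel lo hi ≤ hi := by
  intro fuel
  induction fuel with
  | zero => intro lo hi hle; exact hle
  | succ fuel ih =>
    intro lo hi hle
    rw [pvBis]
    by_cases h : lo < hi
    · rw [if_pos h]
      by_cases hm : S.getD ((lo + hi) / 2) 0 < b
      · simp only [if_pos hm]
        exact ih ((lo + hi) / 2 + 1) hi (by omega)
      · simp only [if_neg hm]
        exact Nat.le_trans (ih lo ((lo + hi) / 2) (by omega)) (by omega)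
    · rw [if_neg h]; exact hle

-- once matched = n, B's fold never increments again
theorem pvFold_sat (S T : List Int) :
    ∀ (l : List Nat),
      l.foldl (fun (matched : Int) j =>
        if matched < (pvBis S (T.getD j 0) S.length 0 S.length : Int) then matched + 1 else matched)
        (S.length : Int) = (S.length : Int) := by
  intro l
  induction l with
  | nil => rfl
  | cons j l ih =>
    have hle : pvBis S (T.getD j 0) S.length 0 S.length ≤ S.length :=
      pvBis_le S (T.getD j 0) S.length 0 S.length (by omega)
    simp only [List.foldl_cons,
      if_neg (by exact_mod_cast Nat.not_lt.mpr hle :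
        ¬ ((S.length : Int) < (pvBis S (T.getD j 0) S.length 0 S.length : Int)))]
    exact ih

-- A's sweep equals the remainder of B's fold: pointer a_i = accumulator matched
theorem pvLoop_eq_fold (S T : List Int) (hs : List.Pairwise (· ≤ ·) S) :
    ∀ (fuel b_i a_i : Nat) (ans : Int),
      S.length - b_i ≤ fuel → b_i ≤ S.length → a_i ≤ S.length →
      pvLoopA S T S.length fuel a_i b_i ans
        = ans + (List.range' b_i (S.length - b_i)).foldl
            (fun (matched : Int) j =>
              if matched < (pvBis S (T.getD j 0) S.length 0 S.length : Int) then matched + 1 else matched)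
            (a_i : Int) - (a_i : Int) := by
  intro fuel
  induction fuel with
  | zero =>
    intro b_i a_i ans hf hb ha
    have heq : b_i = S.length := by omega
    rw [heq]
    simp [pvLoopA]
  | succ fuel ih =>
    intro b_i a_i ans hf hb ha
    rcases Nat.lt_or_ge b_i S.length with hblt | hbge
    · have hsplit : S.length - b_i = (S.length - (b_i + 1)) + 1 := by omega
      rw [pvLoopA, hsplit, List.range'_succ, List.foldl_cons]
      rcases Nat.lt_or_ge a_i S.length with han | han
      · rw [if_pos ⟨han, hblt⟩]
        by_cases hc : T.getD b_i 0 > S.getD a_i 0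
        · rw [if_pos hc]
          have hcond : (a_i : Int) < (pvBis S (T.getD b_i 0) S.length 0 S.length : Int) := by
            exact_mod_cast (pvBis_lt_iff S hs (T.getD b_i 0) a_i).mpr ⟨han, hc⟩
          rw [if_pos hcond, ih (b_i + 1) (a_i + 1) (ans + 1) (by omega) (by omega) (by omega)]
          push_cast
          ring
        · rw [if_neg hc]
          have hcond : ¬ (a_i : Int) < (pvBis S (T.getD b_i 0) S.length 0 S.length : Int) := by
            intro hlt
            have := (pvBis_lt_iff S hs (T.getD b_i 0) a_i).mp (by exact_mod_cast hlt)
            exact hc this.2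
          rw [if_neg hcond, ih (b_i + 1) a_i ans (by omega) (by omega) ha]
      · rw [if_neg (by omega)]
        have heq : a_i = S.length := by omega
        subst heq
        have hle : pvBis S (T.getD b_i 0) S.length 0 S.length ≤ S.length :=
          pvBis_le S (T.getD b_i 0) S.length 0 S.length (by omega)
        rw [if_neg (by exact_mod_cast Nat.not_lt.mpr hle), pvFold_sat]
        ring
    · have heq : b_i = S.length := by omega
      rw [heq, pvLoopA, if_neg (by omega)]
      simp

-- ===== VERDICT (by name: the statement is the Claim_ definition above) =====
theorem solution_spec : Claim_equal_solution := by
  intro A B _ _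
  unfold Spec_solution solution solution_alt
  have hs : List.Pairwise (· ≤ ·) (PySem.List.sorted A (fun x => x) false) :=
    PySem.List.sorted_pairwise A (fun x => x)
  simp only []
  rw [List.range_eq_range']
  have := pvLoop_eq_fold (PySem.List.sorted A (fun x => x) false)
    (PySem.List.sorted B (fun x => x) false) hs
    (PySem.List.sorted A (fun x => x) false).length 0 0 0 (by omega) (by omega) (by omega)
  simp only [Nat.sub_zero] at this
  rw [this]
  simp
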